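-- pv_equiv track=rewrite | github.com/Todd-j-sutherland/trading_feature | comprehensive_database_cleanup.py | categorize_databases
-- ===== SOURCE A (Python) =====
-- def categorize_databases(db_files):
--     """Categorize databases for cleanup"""
--     categories = {
--         'backup_directories': [],
--         'archive_directories': [],
--         'individual_backups': [],
--         'old_ml_databases': [],
--         'test_databases': [],
--         'other_databases': []
--     }
--
--     for db in db_files:
--         if 'backup_' in db or 'migration_backup' in db:
--             categories['backup_directories'].append(db)
--         elif 'archive' in db:
--             categories['archive_directories'].append(db)
--         elif any(name in db for name in ['backup', 'unused']):
--             categories['individual_backups'].append(db)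
--         elif any(name in db for name in ['training_data', 'enhanced_training_data', 'ml_models']):
--             categories['old_ml_databases'].append(db)
--         elif any(name in db for name in ['test', 'testing']):
--             categories['test_databases'].append(db)
--         else:
--             categories['other_databases'].append(db)
--
--     return categories
-- ===== SOURCE B (Python) =====
-- RULES = [
--     ('backup_directories', ['backup_', 'migration_backup']),
--     ('archive_directories', ['archive']),
--     ('individual_backups', ['backup', 'unused']),
--     ('old_ml_databases', ['training_data', 'enhanced_training_data', 'ml_models']),
--     ('test_databases', ['test', 'testing']),
-- ]
--
--
-- def _category(db):
--     for name, subs in RULES: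
--         if any(s in db for s in subs):
--             return name
--     return 'other_databases'
--
--
-- def categorize_databases(db_files):
--     names = [name for name, _ in RULES] + ['other_databases']
--     return {name: [db for db in db_files if _category(db) == name] for name in names}
-- ===== Notes on version B (the rewrite author's own statement) =====
-- stated objective: idiomatic
-- what changed: A's single pass with a six-way if-elif cascade appending into a pre-built dict is replaced by a data-driven rule table: a _category function that scans the rules for the first match, and a dict comprehension building each category's list as one filter pass over db_files.
import Mathlib
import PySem

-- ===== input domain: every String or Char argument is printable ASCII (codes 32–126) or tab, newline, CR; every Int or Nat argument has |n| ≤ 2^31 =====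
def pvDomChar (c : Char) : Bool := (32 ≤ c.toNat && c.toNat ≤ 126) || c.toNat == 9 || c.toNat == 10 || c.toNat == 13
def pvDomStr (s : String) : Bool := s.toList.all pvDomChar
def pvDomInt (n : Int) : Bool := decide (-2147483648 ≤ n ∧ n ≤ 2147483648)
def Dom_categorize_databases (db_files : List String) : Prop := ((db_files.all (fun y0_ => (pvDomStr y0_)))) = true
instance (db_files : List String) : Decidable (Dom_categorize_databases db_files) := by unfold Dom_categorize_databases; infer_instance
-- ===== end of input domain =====

-- B replaces A's single-pass if-elif cascade by a rule table and one filter pass per category (idiomatic, data-driven).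

-- ===== PORT A =====
-- one loop step of A's for-loop: the if-elif cascade appending db into the dict entry
def pvStepA (d : PySem.Dict String (List String)) (db : String) : PySem.Dict String (List String) :=
  if PySem.Str.isIn "backup_" db || PySem.Str.isIn "migration_backup" db then
    d.modify "backup_directories" [] (fun l => l ++ [db])
  else if PySem.Str.isIn "archive" db then
    d.modify "archive_directories" [] (fun l => l ++ [db])
  else if ["backup", "unused"].any (fun name => PySem.Str.isIn name db) then
    d.modify "individual_backups" [] (fun l => l ++ [db])
  else if ["training_data", "enhanced_training_data", "ml_models"].any (fun name => PySem.Str.isIn name db) then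
    d.modify "old_ml_databases" [] (fun l => l ++ [db])
  else if ["test", "testing"].any (fun name => PySem.Str.isIn name db) then
    d.modify "test_databases" [] (fun l => l ++ [db])
  else
    d.modify "other_databases" [] (fun l => l ++ [db])

def categorize_databases (db_files : List String) : List (String × List String) :=
  (db_files.foldl pvStepA
    (PySem.Dict.ofList
      [("backup_directories", []), ("archive_directories", []), ("individual_backups", []),
       ("old_ml_databases", []), ("test_databases", []), ("other_databases", [])])).items

-- ===== PORT B =====
-- Source B's RULES table
def pvRules : List (String × List String) :=
  [("backup_directories", ["backup_", "migration_backup"]),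
   ("archive_directories", ["archive"]),
   ("individual_backups", ["backup", "unused"]),
   ("old_ml_databases", ["training_data", "enhanced_training_data", "ml_models"]),
   ("test_databases", ["test", "testing"])]

-- Source B's _category: first rule whose substring list matches, else 'other_databases'
def pvCategory (db : String) : String :=
  match pvRules.find? (fun r => r.2.any (fun s => PySem.Str.isIn s db)) with
  | some r => r.1
  | none => "other_databases"

-- dict comprehension over the (distinct) rule names + 'other_databases': one filter per name
def categorize_databases_alt (db_files : List String) : List (String × List String) :=
  (pvRules.map (·.1) ++ ["other_databases"]).map
    (fun name => (name, db_files.filter (fun db => pvCategory db == name)))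

-- ===== PRECONDITION & SPEC =====
def Spec_categorize_databases (db_files : List String) (out : List (String × List String)) : Prop := out = categorize_databases_alt db_files
instance (db_files : List String) (out : List (String × List String)) : Decidable (Spec_categorize_databases db_files out) := by unfold Spec_categorize_databases; infer_instance

-- ===== CLAIM (what is proved, stated in full; the proofs are below) =====
def Claim_equal_categorize_databases : Prop := ∀ (db_files : List String), Dom_categorize_databases db_files → Spec_categorize_databases db_files (categorize_databases db_files)

-- ===== LEMMAS AND PROOFS =====
def pvC1 (db : String) : Bool := PySem.Str.isIn "backup_" db || PySem.Str.isIn "migration_backup" db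
def pvC2 (db : String) : Bool := PySem.Str.isIn "archive" db
def pvC3 (db : String) : Bool := ["backup", "unused"].any (fun n => PySem.Str.isIn n db)
def pvC4 (db : String) : Bool := ["training_data", "enhanced_training_data", "ml_models"].any (fun n => PySem.Str.isIn n db)
def pvC5 (db : String) : Bool := ["test", "testing"].any (fun n => PySem.Str.isIn n db)

set_option maxHeartbeats 4000000 in
lemma pvCategory_eq (db : String) :
    pvCategory db =
      if pvC1 db then "backup_directories"
      else if pvC2 db then "archive_directories"
      else if pvC3 db then "individual_backups"
      else if pvC4 db then "old_ml_databases"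
      else if pvC5 db then "test_databases"
      else "other_databases" := by
  unfold pvCategory pvRules pvC1 pvC2 pvC3 pvC4 pvC5
  by_cases h1a : PySem.Str.isIn "backup_" db = true <;>
    by_cases h1b : PySem.Str.isIn "migration_backup" db = true <;>
    by_cases h2 : PySem.Str.isIn "archive" db = true <;>
    by_cases h3a : PySem.Str.isIn "backup" db = true <;>
    by_cases h3b : PySem.Str.isIn "unused" db = true <;>
    by_cases h4a : PySem.Str.isIn "training_data" db = true <;>
    by_cases h4b : PySem.Str.isIn "enhanced_training_data" db = true <;>
    by_cases h4c : PySem.Str.isIn "ml_models" db = true <;>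
    by_cases h5a : PySem.Str.isIn "test" db = true <;>
    by_cases h5b : PySem.Str.isIn "testing" db = true <;>
    simp_all [List.find?, List.any]

lemma pvStepA_eq (d : PySem.Dict String (List String)) (db : String) :
    pvStepA d db =
      if pvC1 db then d.modify "backup_directories" [] (fun l => l ++ [db])
      else if pvC2 db then d.modify "archive_directories" [] (fun l => l ++ [db])
      else if pvC3 db then d.modify "individual_backups" [] (fun l => l ++ [db])
      else if pvC4 db then d.modify "old_ml_databases" [] (fun l => l ++ [db])
      else if pvC5 db then d.modify "test_databases" [] (fun l => l ++ [db])
      else d.modify "other_databases" [] (fun l => l ++ [db]) := rfl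

lemma pvFold_eq (xs : List String) (b a i m t o : List String) :
    xs.foldl pvStepA
      (PySem.Dict.mk
        [("backup_directories", b), ("archive_directories", a), ("individual_backups", i),
         ("old_ml_databases", m), ("test_databases", t), ("other_databases", o)]) =
    PySem.Dict.mk
      [("backup_directories", b ++ xs.filter pvC1),
       ("archive_directories", a ++ xs.filter (fun db => !pvC1 db && pvC2 db)),
       ("individual_backups", i ++ xs.filter (fun db => !pvC1 db && !pvC2 db && pvC3 db)),
       ("old_ml_databases", m ++ xs.filter (fun db => !pvC1 db && !pvC2 db && !pvC3 db && pvC4 db)),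
       ("test_databases", t ++ xs.filter (fun db => !pvC1 db && !pvC2 db && !pvC3 db && !pvC4 db && pvC5 db)),
       ("other_databases", o ++ xs.filter (fun db => !pvC1 db && !pvC2 db && !pvC3 db && !pvC4 db && !pvC5 db))] := by
  induction xs generalizing b a i m t o with
  | nil => simp
  | cons x xs ih =>
    simp only [List.foldl_cons, List.filter_cons, pvStepA_eq]
    by_cases h1 : pvC1 x = true <;> by_cases h2 : pvC2 x = true <;> by_cases h3 : pvC3 x = true <;>
      by_cases h4 : pvC4 x = true <;> by_cases h5 : pvC5 x = true <;>
      simp [h1, h2, h3, h4, h5, PySem.Dict.modify, PySem.Dict.insert, PySem.Dict.getD, PySem.Dict.get?, PySem.Dict.contains, ih]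

set_option maxHeartbeats 1000000 in
theorem categorize_databases_spec : Claim_equal_categorize_databases := by
  intro db_files _
  unfold Spec_categorize_databases categorize_databases categorize_databases_alt
  rw [show (PySem.Dict.ofList
      [("backup_directories", ([] : List String)), ("archive_directories", []), ("individual_backups", []),
       ("old_ml_databases", []), ("test_databases", []), ("other_databases", [])] :
      PySem.Dict String (List String)) = PySem.Dict.mk
      [("backup_directories", []), ("archive_directories", []), ("individual_backups", []),
       ("old_ml_databases", []), ("test_databases", []), ("other_databases", [])] from rfl,
    pvFold_eq]
  simp only [pvRules, List.map]
  refine List.ext_getElem (by simp) ?_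
  intro n h1 h2
  simp only [List.length_cons, List.length_nil] at h1
  interval_cases n <;>
  · simp only [List.cons_append, List.nil_append, List.map_cons, List.map_nil,
        List.getElem_cons_zero, List.getElem_cons_succ, Prod.mk.injEq, true_and]
    refine List.filter_congr (fun db _ => ?_)
    rw [pvCategory_eq]
    by_cases h1 : pvC1 db = true <;> by_cases h2 : pvC2 db = true <;> by_cases h3 : pvC3 db = true <;>
      by_cases h4 : pvC4 db = true <;> by_cases h5 : pvC5 db = true <;> simp_all
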